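-- pv_equiv track=rewrite | github.com/CarsonScott/Automated-Logical-Systems | src/Functions.py | parse
-- ===== SOURCE A (Python) =====
-- def parse(statement):
-- 	w = ''
-- 	s = []
-- 	state = None
-- 	for i in range(len(statement)):
-- 		if state == None:
-- 			s.append('START')
--
-- 		state = s[len(s)-1]
-- 		if statement[i] == '(':
-- 			s.append('CALL')
-- 			s.append(w)
-- 			s.append('INPUT')
-- 			w = ''
-- 		elif statement[i] == ',':
-- 			s.append(w)
-- 			s.append('INPUT')
-- 			w = ''
-- 		elif statement[i] == ')':
-- 			if w != '':
-- 				s.append(w)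
--
-- 			s.append('END')
-- 			w = ''
-- 		elif statement[i] == ';':
-- 			s.append('STOP')
-- 			w = ''
-- 		elif statement[i] != ' ':
-- 			w += statement[i]
-- 	return s
-- ===== SOURCE B (Python) =====
-- def parse(statement):
--     # phase 1: split into alternating word/delimiter fragments
--     frags = ['']
--     for ch in statement:
--         if ch in '(),;':
--             frags.append(ch)
--             frags.append('')
--         else:
--             frags[-1] += ch
--     # phase 2: map each delimiter fragment to its token group
--     out = ['START'] if statement else []
--     word = ''.join(c for c in frags[0] if c != ' ')
--     for i in range(1, len(frags), 2):
--         d = frags[i]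
--         if d == '(':
--             out += ['CALL', word, 'INPUT']
--         elif d == ',':
--             out += [word, 'INPUT']
--         elif d == ')':
--             if word:
--                 out.append(word)
--             out.append('END')
--         else:
--             out.append('STOP')
--         word = ''.join(c for c in frags[i + 1] if c != ' ')
--     return out
-- ===== Notes on version B (the rewrite author's own statement) =====
-- stated objective: alternative
-- what changed: Replaced the inline character state-machine (START-flag, growing word buffer, branch per char) by a tokenize-then-map decomposition: first split the statement into alternating word/delimiter fragments, then a second pass maps each delimiter fragment to its token group, stripping spaces from the preceding word fragment at use time.
import Mathlib
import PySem

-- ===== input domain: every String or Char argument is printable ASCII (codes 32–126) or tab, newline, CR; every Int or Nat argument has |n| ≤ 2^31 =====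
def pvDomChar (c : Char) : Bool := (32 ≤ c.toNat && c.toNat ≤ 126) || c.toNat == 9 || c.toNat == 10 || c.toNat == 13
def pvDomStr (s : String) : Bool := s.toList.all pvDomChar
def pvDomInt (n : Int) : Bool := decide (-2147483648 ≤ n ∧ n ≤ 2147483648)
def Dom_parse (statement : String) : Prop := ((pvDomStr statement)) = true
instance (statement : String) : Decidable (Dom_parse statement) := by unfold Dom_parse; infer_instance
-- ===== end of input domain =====

-- B rewrites A's inline character state-machine as a tokenize-then-map two-pass decomposition (objective: alternative).

-- ===== PORT A =====
-- one loop iteration of A: state = (w, s, state); START appended when state is None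
def parseStep (acc : String × List String × Option String) (c : Char) :
    String × List String × Option String :=
  let s0 := if acc.2.2 = none then acc.2.1 ++ ["START"] else acc.2.1
  -- state = s[len(s)-1]; s0 is never empty here, so getLastD is exact
  let st : Option String := some (s0.getLastD "")
  if c = '(' then ("", s0 ++ ["CALL", acc.1, "INPUT"], st)
  else if c = ',' then ("", s0 ++ [acc.1, "INPUT"], st)
  else if c = ')' then ("", (if acc.1 ≠ "" then s0 ++ [acc.1] else s0) ++ ["END"], st)
  else if c = ';' then ("", s0 ++ ["STOP"], st)
  else if c ≠ ' ' then (acc.1.push c, s0, st)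
  else (acc.1, s0, st)

def parse (statement : String) : List String :=
  (statement.toList.foldl parseStep ("", [], none)).2.1

-- ===== PORT B =====
-- ch in '(),;'
def isDelim (c : Char) : Bool := c = '(' || c = ',' || c = ')' || c = ';'

-- ''.join(c for c in s if c != ' ')
def stripSpaces (s : String) : String := String.ofList (s.toList.filter (fun c => c ≠ ' '))

-- phase-1 loop body: append delimiter + fresh fragment, or frags[-1] += ch
def fragStep (fs : List String) (c : Char) : List String :=
  if isDelim c then fs ++ [String.singleton c, ""]
  else fs.dropLast ++ [(fs.getLastD "").push c]

-- phase-2 loop: walk the delimiter/word pairs frags[i], frags[i+1]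
def emitLoop (out : List String) (word : String) (rest : List String) : List String :=
  match rest with
  | d :: w' :: rest' =>
    let out' :=
      if d = "(" then out ++ ["CALL", word, "INPUT"]
      else if d = "," then out ++ [word, "INPUT"]
      else if d = ")" then (if word ≠ "" then out ++ [word] else out) ++ ["END"]
      else out ++ ["STOP"]
    emitLoop out' (stripSpaces w') rest'
  | _ => out

def parse_alt (statement : String) : List String :=
  let frags := statement.toList.foldl fragStep [""]
  let out0 := if statement = "" then [] else ["START"]
  emitLoop out0 (stripSpaces (frags.headD "")) frags.tail

-- ===== PRECONDITION & SPEC =====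
def Spec_parse (statement : String) (out : List String) : Prop := out = parse_alt statement
instance (statement : String) (out : List String) : Decidable (Spec_parse statement out) := by unfold Spec_parse; infer_instance

-- ===== CLAIM (what is proved, stated in full; the proofs are below) =====
def Claim_equal_parse : Prop := ∀ (statement : String), Dom_parse statement → Spec_parse statement (parse statement)

-- ===== LEMMAS AND PROOFS =====
-- fragment list built from pending raw word p and remaining characters cs
def buildF (p : String) (cs : List Char) : List String :=
  match cs with
  | [] => [p]
  | c :: cs' => if isDelim c then p :: String.singleton c :: buildF "" cs' else buildF (p.push c) cs'

theorem buildF_ne_nil (cs : List Char) (p : String) : buildF p cs ≠ [] := by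
  cases cs with
  | nil => simp [buildF]
  | cons c cs' =>
    by_cases h : isDelim c
    · simp [buildF, h]
    · simp only [buildF, h, if_neg, Bool.false_eq_true, not_false_eq_true, if_false]
      exact buildF_ne_nil cs' _

theorem fold_frag (cs : List Char) : ∀ (fs : List String) (p : String),
    List.foldl fragStep (fs ++ [p]) cs = fs ++ buildF p cs := by
  induction cs with
  | nil => intro fs p; simp [buildF]
  | cons c cs' ih =>
    intro fs p
    by_cases h : isDelim c
    · have : fragStep (fs ++ [p]) c = (fs ++ [p, String.singleton c]) ++ [""] := by
        simp [fragStep, h]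
      simp only [List.foldl_cons, this, ih, buildF, h, if_pos]
      simp
    · have : fragStep (fs ++ [p]) c = fs ++ [p.push c] := by
        simp [fragStep, h]
      simp [List.foldl_cons, this, ih, buildF, h]

theorem stripSpaces_push (p : String) (c : Char) :
    stripSpaces (p.push c) = if c = ' ' then stripSpaces p else (stripSpaces p).push c := by
  apply String.toList_inj.mp
  by_cases h : c = ' ' <;>
    simp [stripSpaces, h, String.toList_push, List.filter_append]


theorem main_inv (cs : List Char) : ∀ (p : String) (s : List String) (st : String),
    (List.foldl parseStep (stripSpaces p, s, some st) cs).2.1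
      = emitLoop s (stripSpaces ((buildF p cs).headD "")) (buildF p cs).tail := by
  induction cs with
  | nil => intro p s st; simp [buildF, emitLoop]
  | cons c cs' ih =>
    intro p s st
    by_cases hd : isDelim c
    · obtain ⟨w', rest', hw⟩ : ∃ w' rest', buildF "" cs' = w' :: rest' := by
        cases hh : buildF "" cs' with
        | nil => exact absurd hh (buildF_ne_nil cs' "")
        | cons a b => exact ⟨a, b, rfl⟩
      have h0 : ("" : String) = stripSpaces "" := by simp [stripSpaces]
      rcases (by simpa [isDelim, or_assoc] using hd :
          c = '(' ∨ c = ',' ∨ c = ')' ∨ c = ';') with h1 | h1 | h1 | h1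
      · have hstep : parseStep (stripSpaces p, s, some st) c
            = (stripSpaces "", s ++ ["CALL", stripSpaces p, "INPUT"], some (s.getLastD "")) := by
          rw [← h0]; simp [parseStep, h1]
        have e : String.singleton '(' = "(" := by decide
        rw [List.foldl_cons, hstep, ih]
        simp [buildF, isDelim, h1, hw, emitLoop, e]
      · have hstep : parseStep (stripSpaces p, s, some st) c
            = (stripSpaces "", s ++ [stripSpaces p, "INPUT"], some (s.getLastD "")) := by
          rw [← h0]; simp [parseStep, h1]
        have e : String.singleton ',' = "," := by decide
        rw [List.foldl_cons, hstep, ih]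
        simp [buildF, isDelim, h1, hw, emitLoop, e]
      · have hstep : parseStep (stripSpaces p, s, some st) c
            = (stripSpaces "", (if stripSpaces p ≠ "" then s ++ [stripSpaces p] else s) ++ ["END"],
               some (s.getLastD "")) := by
          rw [← h0]; simp [parseStep, h1]
        have e : String.singleton ')' = ")" := by decide
        rw [List.foldl_cons, hstep, ih]
        simp [buildF, isDelim, h1, hw, emitLoop, e]
      · have hstep : parseStep (stripSpaces p, s, some st) c
            = (stripSpaces "", s ++ ["STOP"], some (s.getLastD "")) := by
          rw [← h0]; simp [parseStep, h1]
        have e : String.singleton ';' = ";" := by decide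
        rw [List.foldl_cons, hstep, ih]
        simp [buildF, isDelim, h1, hw, emitLoop, e]
    · have h4 : ¬ c = '(' ∧ ¬ c = ',' ∧ ¬ c = ')' ∧ ¬ c = ';' := by
        simpa [isDelim, and_assoc] using hd
      by_cases hsp : c = ' '
      · have hstep : parseStep (stripSpaces p, s, some st) c
            = (stripSpaces (p.push ' '), s, some (s.getLastD "")) := by
          simp [parseStep, hsp, stripSpaces_push]
        rw [List.foldl_cons, hstep, hsp, ih]
        simp [buildF, isDelim]
      · have hstep : parseStep (stripSpaces p, s, some st) c
            = (stripSpaces (p.push c), s, some (s.getLastD "")) := by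
          simp [parseStep, h4.1, h4.2.1, h4.2.2.1, h4.2.2.2, hsp, stripSpaces_push]
        rw [List.foldl_cons, hstep, ih]
        simp [buildF, isDelim, h4.1, h4.2.1, h4.2.2.1, h4.2.2.2]

-- ===== VERDICT (by name: the statement is the Claim_ definition above) =====
theorem parse_spec : Claim_equal_parse := by
  intro statement _
  unfold Spec_parse parse parse_alt
  cases hs : statement.toList with
  | nil =>
    have he : statement = "" := by
      have := congrArg String.ofList hs
      simpa using this
    simp [he, emitLoop, stripSpaces]
  | cons c cs =>
    have hne : ¬ statement = "" := by
      intro h; rw [h] at hs; simp at hs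
    have hfirst : parseStep ("", ([] : List String), (none : Option String)) c
        = parseStep ("", ["START"], some "START") c := by
      simp [parseStep]
    have hfr : List.foldl fragStep [""] (c :: cs) = buildF "" (c :: cs) :=
      fold_frag (c :: cs) [] ""
    have h0 : ("" : String) = stripSpaces "" := by simp [stripSpaces]
    calc (List.foldl parseStep ("", [], none) (c :: cs)).2.1
        = (List.foldl parseStep (parseStep ("", ["START"], some "START") c) cs).2.1 := by
          rw [List.foldl_cons, hfirst]
      _ = (List.foldl parseStep (stripSpaces "", ["START"], some "START") (c :: cs)).2.1 := by
          rw [List.foldl_cons, ← h0]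
      _ = emitLoop ["START"] (stripSpaces ((buildF "" (c :: cs)).headD "")) (buildF "" (c :: cs)).tail :=
          main_inv (c :: cs) "" ["START"] "START"
      _ = _ := by simp [hfr, hne]
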